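-- pv_equiv track=rewrite | github.com/Pessina/Unicamp | mc521/3/3j.py | remove_stone
-- ===== SOURCE A (Python) =====
-- def remove_stone(s, i, x):
--     if i == len(s):
--         return x
--
--     if s[i - 1] == s[i]:
--         del s[i]
--         x = remove_stone(s, i, x+1)
--         return x
--     else:
--         x = remove_stone(s, i+1, x)
--         return x
-- ===== SOURCE B (Python) =====
-- def remove_stone(s, i, x):
--     # Single linear pass: count collapsed consecutive duplicates from index i,
--     # then write the collapsed list back in place (same mutation as A).
--     if i == len(s):
--         return x
--     kept = s[:i]
--     prev = s[i - 1]
--     removed = 0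
--     for v in s[i:]:
--         if v == prev:
--             removed += 1
--         else:
--             kept.append(v)
--             prev = v
--     s[:] = kept
--     return x + removed
-- ===== Notes on version B (the rewrite author's own statement) =====
-- stated objective: faster
-- what changed: Replaces the O(n^2) recursion with in-place del by a single linear pass that counts collapsed consecutive duplicates and writes the result back once with s[:]=kept.
-- outside the precondition, e.g. on remove_stone([1, 1, 2, 2, 3], -2, 0): A returns 2, B returns 1
import Mathlib
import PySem

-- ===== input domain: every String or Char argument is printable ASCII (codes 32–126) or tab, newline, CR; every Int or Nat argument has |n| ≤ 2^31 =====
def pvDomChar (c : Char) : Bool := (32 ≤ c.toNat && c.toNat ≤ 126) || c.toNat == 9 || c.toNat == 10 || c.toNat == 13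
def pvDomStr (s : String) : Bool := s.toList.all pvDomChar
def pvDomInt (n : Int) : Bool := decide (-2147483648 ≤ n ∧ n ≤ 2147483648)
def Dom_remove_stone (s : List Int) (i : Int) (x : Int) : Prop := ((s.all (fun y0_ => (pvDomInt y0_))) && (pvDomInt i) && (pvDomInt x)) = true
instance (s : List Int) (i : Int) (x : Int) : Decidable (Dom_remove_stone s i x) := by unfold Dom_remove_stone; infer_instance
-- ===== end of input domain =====

-- B collapses consecutive duplicates from index i in ONE linear pass (counting removals) instead
-- of A's quadratic recursion with repeated `del`. Both mutate s identically on Pre_ in Python;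
-- the equivalence proved here is about the return value.

-- ===== PORT A =====
-- A's recursion: if i == len(s) return x; else compare s[i-1] with s[i]; if equal, del s[i] and
-- recurse at the same i with x+1, else recurse at i+1. The Nat fuel only makes the recursion
-- structural (every Python-terminating path uses less than the fuel supplied below);
-- `none` cases are Python's IndexError.
def remove_stone_go : Nat → List Int → Int → Int → Int
  | 0, _, _, _ => 0
  | fuel + 1, s, i, x =>
    if i = (s.length : Int) then x
    else
      match PySem.List.pyGet? s (i - 1), PySem.List.pyGet? s i with
      | some a, some b =>
        if a = b then
          match PySem.List.pop? s i with
          | some r => remove_stone_go fuel r.2 i (x + 1)      -- del s[i]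
          | none => 0                                          -- unreachable IndexError
        else remove_stone_go fuel s (i + 1) x
      | _, _ => 0                                              -- IndexError

def remove_stone (s : List Int) (i : Int) (x : Int) : Int :=
  remove_stone_go (2 * s.length + i.natAbs + 1) s i x

-- ===== PORT B =====
-- B: prev = s[i-1]; one pass over s[i:] counting values equal to the running prev.
-- (Source B also accumulates `kept` to write s[:] = kept; that in-place update does not
-- affect the returned value, which is all this port computes.)
def remove_stone_alt (s : List Int) (i : Int) (x : Int) : Int :=
  if i = (s.length : Int) then x
  else
    match PySem.List.pyGet? s (i - 1) with
    | none => 0                                      -- IndexError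
    | some prev =>
      let st := (PySem.List.slice s (some i) none).foldl
        (fun (pr : Int × Int) v => if v = pr.1 then (pr.1, pr.2 + 1) else (v, pr.2)) (prev, 0)
      x + st.2

-- ===== PRECONDITION & SPEC =====
-- Pre_ excludes negative i: there Python's negative-index wraparound makes the "predecessor"
-- s[i-1] accidental and after deletions A often raises IndexError; where A does return
-- (e.g. ([1,1,2,2,3], -2, 0) → 2) the value is an artefact of the shifting negative index.
-- It also excludes i > len(s), where A raises IndexError immediately.
def Pre_remove_stone (s : List Int) (i : Int) (x : Int) : Prop :=
  0 ≤ i ∧ i ≤ (s.length : Int)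
instance (s : List Int) (i : Int) (x : Int) : Decidable (Pre_remove_stone s i x) := by
  unfold Pre_remove_stone; infer_instance

def pvWitness_remove_stone : List Int × Int × Int := ([1, 1, 2, 2, 3], 1, 0)

def Spec_remove_stone (s : List Int) (i : Int) (x : Int) (out : Int) : Prop := out = remove_stone_alt s i x
instance (s : List Int) (i : Int) (x : Int) (out : Int) : Decidable (Spec_remove_stone s i x out) := by unfold Spec_remove_stone; infer_instance

-- ===== CLAIM (what is proved, stated in full; the proofs are below) =====
def Claim_equal_remove_stone : Prop := ∀ (s : List Int) (i : Int) (x : Int), Dom_remove_stone s i x → Pre_remove_stone s i x → Spec_remove_stone s i x (remove_stone s i x)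

-- ===== LEMMAS AND PROOFS =====

-- Number of elements removed when consecutive duplicates of `rest` are collapsed,
-- with `p` the element preceding `rest`.
def countRem : Int → List Int → Int
  | _, [] => 0
  | p, v :: r => if v = p then 1 + countRem p r else countRem v r

-- B's fold computes countRem.
theorem foldl_countRem (l : List Int) (p n : Int) :
    (l.foldl (fun (pr : Int × Int) v => if v = pr.1 then (pr.1, pr.2 + 1) else (v, pr.2)) (p, n)).2
      = n + countRem p l := by
  induction l generalizing p n with
  | nil => simp [countRem]
  | cons v r ih =>
    simp only [List.foldl_cons, countRem]
    by_cases h : v = p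
    · simp [h, ih]; ring
    · simp [h, ih]

-- A's loop on a decomposed input pre ++ p :: rest at index pre.length + 1, with enough fuel.
theorem A_decomp (rest : List Int) : ∀ (f : Nat) (pre : List Int) (p x : Int),
    rest.length < f →
    remove_stone_go f (pre ++ p :: rest) ((pre.length : Int) + 1) x = x + countRem p rest := by
  induction rest with
  | nil =>
    intro f pre p x hf
    obtain ⟨f, rfl⟩ : ∃ g, f = g + 1 := ⟨f - 1, by omega⟩
    rw [remove_stone_go]
    simp [countRem]
  | cons v r ih =>
    intro f pre p x hf
    obtain ⟨f, rfl⟩ : ∃ g, f = g + 1 := ⟨f - 1, by omega⟩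
    rw [remove_stone_go]
    have hne : ¬ ((pre.length : Int) + 1 = ((pre ++ p :: v :: r).length : Int)) := by
      simp; omega
    rw [if_neg hne]
    have hg1 : PySem.List.pyGet? (pre ++ p :: v :: r) ((pre.length : Int) + 1 - 1)
        = some p := by
      rw [show (pre.length : Int) + 1 - 1 = (pre.length : Int) by ring]
      exact PySem.List.pyGet?_append_length pre (v :: r) p
    have hg2 : PySem.List.pyGet? (pre ++ p :: v :: r) ((pre.length : Int) + 1)
        = some v := by
      simpa using PySem.List.pyGet?_append_length (pre ++ [p]) r v
    rw [hg1, hg2]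
    split
    case h_2 hno => exact (hno p v rfl rfl).elim
    rename_i a b ha hb
    injection ha with ha
    injection hb with hb
    subst ha hb
    have hfr : r.length < f := by simpa using hf
    by_cases h : p = v
    · rw [if_pos h]
      have hlt : pre.length + 1 < (pre ++ p :: v :: r).length := by simp
      have herase : (pre ++ p :: v :: r).eraseIdx (pre.length + 1) = pre ++ p :: r := by
        rw [List.eraseIdx_append_of_length_le (by omega)]
        simp
      have hpop' : PySem.List.pop? (pre ++ p :: v :: r) ((pre.length : Int) + 1)
          = some ((pre ++ p :: v :: r)[pre.length + 1]'hlt, pre ++ p :: r) := by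
        rw [show ((pre.length : Int) + 1) = ((pre.length + 1 : Nat) : Int) by push_cast; ring,
          PySem.List.pop?_natCast (pre ++ p :: v :: r) (pre.length + 1) hlt, herase]
      split
      · rename_i rr hr
        rw [hpop'] at hr
        injection hr with hr
        rw [← hr]
        rw [ih f pre p (x + 1) hfr]
        have hvp : v = p := h.symm
        simp only [countRem, if_pos hvp]
        ring
      · rename_i hr
        rw [hpop'] at hr
        cases hr
    · rw [if_neg h]
      have harg : (pre ++ p :: v :: r) = (pre ++ [p]) ++ v :: r := by simp
      rw [harg, show (pre.length : Int) + 1 + 1 = (((pre ++ [p]).length : Nat) : Int) + 1 by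
        simp, ih f (pre ++ [p]) v x hfr]
      have hvp : ¬ v = p := fun hh => h hh.symm
      simp [countRem, hvp]

-- A's loop at i = 0 on a nonempty list: the "predecessor" is s[-1], the last element.
theorem A_zero (s : List Int) : ∀ (f : Nat) (h : s ≠ []) (x : Int),
    s.length < f →
    remove_stone_go f s 0 x = x + countRem (s.getLast h) s := by
  induction s with
  | nil => intro f h; exact absurd rfl h
  | cons v rest ih =>
    intro f h x hf
    obtain ⟨f, rfl⟩ : ∃ g, f = g + 1 := ⟨f - 1, by omega⟩
    rw [remove_stone_go]
    have hne : ¬ ((0 : Int) = (((v :: rest).length : Nat) : Int)) := by simp; omega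
    rw [if_neg hne]
    have hg1 : PySem.List.pyGet? (v :: rest) ((0 : Int) - 1)
        = some ((v :: rest).getLast h) := by
      rw [show ((0 : Int) - 1) = (-1 : Int) by ring, PySem.List.pyGet?_neg_one]
      simp [List.getLast?_eq_some_getLast]
    have hg2 : PySem.List.pyGet? (v :: rest) (0 : Int) = some v :=
      PySem.List.pyGet?_zero_cons v rest
    rw [hg1, hg2]
    have hpop : PySem.List.pop? (v :: rest) (0 : Int) = some (v, rest) :=
      PySem.List.pop?_zero_cons v rest
    have hfr : rest.length < f := by simpa using hf
    split
    case h_2 hno => exact (hno _ _ rfl rfl).elim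
    rename_i a b ha hb
    injection ha with ha
    injection hb with hb
    subst ha hb
    by_cases heq : (v :: rest).getLast h = v
    · rw [if_pos heq]
      have hstep : (match PySem.List.pop? (v :: rest) (0 : Int) with
          | some rr => remove_stone_go f rr.2 0 (x + 1)
          | none => 0) = remove_stone_go f rest 0 (x + 1) := by
        split
        · rename_i rr hr
          rw [hpop] at hr
          injection hr with hr
          rw [← hr]
        · rename_i hr
          rw [hpop] at hr
          cases hr
      rw [hstep]
      by_cases hrest : rest = []
      · subst hrest
        obtain ⟨f, rfl⟩ : ∃ g, f = g + 1 := ⟨f - 1, by omega⟩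
        rw [remove_stone_go]
        have hv : (v :: ([] : List Int)).getLast h = v := by simp
        rw [hv] at heq ⊢
        simp [countRem]
      · have hlast : rest.getLast hrest = (v :: rest).getLast h :=
          (List.getLast_cons hrest).symm
        rw [ih f hrest (x + 1) hfr, hlast]
        have hvL : v = (v :: rest).getLast h := heq.symm
        simp only [countRem, if_pos hvL]
        ring
    · rw [if_neg heq]
      have := A_decomp rest f [] v x hfr
      simp only [List.nil_append, List.length_nil, Nat.cast_zero, zero_add] at this
      norm_num
      rw [this]
      have hvL : ¬ v = (v :: rest).getLast h := fun hh => heq hh.symm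
      simp [countRem, hvL]

-- B evaluated at 1 ≤ i < len: prev = s[i-1] and one pass over the suffix s[i:].
theorem B_eval (s : List Int) (i x : Int) (h1 : 1 ≤ i) (hlt : i < (s.length : Int)) :
    remove_stone_alt s i x
      = x + countRem (s[(i - 1).toNat]'(by omega)) (s.drop i.toNat) := by
  rw [remove_stone_alt, if_neg (by omega)]
  have hg : PySem.List.pyGet? s (i - 1) = some (s[(i - 1).toNat]'(by omega)) :=
    PySem.List.pyGet?_eq_some_getElem s (by omega) (by omega)
  rw [hg]
  simp only [PySem.List.slice_from s (by omega : (0 : Int) ≤ i)]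
  rw [foldl_countRem]
  simp

-- B evaluated at i = 0 on a nonempty list: prev = s[-1].
theorem B_zero (s : List Int) (h : s ≠ []) (x : Int) :
    remove_stone_alt s 0 x = x + countRem (s.getLast h) s := by
  have hpos : 0 < s.length := List.length_pos_iff.mpr h
  rw [remove_stone_alt, if_neg (by omega)]
  have hg : PySem.List.pyGet? s ((0 : Int) - 1) = some (s.getLast h) := by
    rw [show ((0 : Int) - 1) = (-1 : Int) by ring, PySem.List.pyGet?_neg_one]
    exact List.getLast?_eq_some_getLast h
  rw [hg]
  simp only [PySem.List.slice_from s (le_refl (0 : Int))]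
  rw [foldl_countRem]
  norm_num

theorem remove_stone_spec : Claim_equal_remove_stone := by
  unfold Claim_equal_remove_stone
  intro s i x _ hpre
  obtain ⟨h0, hle⟩ := hpre
  unfold Spec_remove_stone
  by_cases hEnd : i = (s.length : Int)
  · rw [remove_stone, remove_stone_go, if_pos hEnd, remove_stone_alt, if_pos hEnd]
  · have hlt : i < (s.length : Int) := lt_of_le_of_ne hle hEnd
    by_cases hz : i = 0
    · subst hz
      have hne : s ≠ [] := by intro hnil; subst hnil; simp at hlt
      rw [remove_stone, A_zero s _ hne x (by simp; omega), B_zero s hne x]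
    · have h1 : 1 ≤ i := by omega
      set n := i.toNat with hn
      have hn1 : 1 ≤ n := by omega
      have hnlt : n < s.length := by omega
      have hdec : s = s.take (n - 1) ++ s[n - 1]'(by omega) :: s.drop n := by
        conv_lhs => rw [← List.take_append_drop (n - 1) s]
        congr 1
        rw [List.drop_eq_getElem_cons (show n - 1 < s.length by omega)]
        congr 2
        omega
      have hlen : (s.take (n - 1)).length = n - 1 := by
        rw [List.length_take]; omega
      obtain ⟨p, hp⟩ : ∃ p, s = s.take (n - 1) ++ p :: s.drop n := ⟨_, hdec⟩
      have hA : remove_stone s i x = x + countRem p (s.drop n) := by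
        conv_lhs =>
          rw [hp, show i = (((s.take (n - 1)).length : Nat) : Int) + 1 by rw [hlen]; omega]
        rw [remove_stone]
        apply A_decomp
        simp only [List.length_append, List.length_cons, List.length_take, List.length_drop]
        omega
      have hB := B_eval s i x h1 hlt
      rw [hA, hB]
      have hidx : (i - 1).toNat = n - 1 := by omega
      have hdrop : i.toNat = n := by omega
      simp only [hidx, hdrop]
      have hpv : p = s[n - 1]'(by omega) := by
        have hcat := List.append_cancel_left (hdec.symm.trans hp)
        injection hcat with hcat
        exact hcat.symm
      rw [hpv]
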